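-- pv_equiv track=rewrite | github.com/FeliciaFredlund/scripting-and-other-code-learning | D0042D_Programmering/lab3-elections.py | result
-- ===== SOURCE A (Python) =====
-- def result(dic):
--     highest_votes = 0
--     person_with_highest_votes = "***OPEN***"
--     for person, votes in dic.items():
--         if votes > highest_votes:
--             person_with_highest_votes = person
--             highest_votes = votes
--         elif votes == highest_votes:
--             person_with_highest_votes = "***OPEN***"
--
--     return person_with_highest_votes
-- ===== SOURCE B (Python) =====
-- def result(dic):
--     if not dic:
--         return "***OPEN***"
--     m = max(dic.values())
--     if m <= 0:
--         return "***OPEN***"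
--     winners = [person for person, votes in dic.items() if votes == m]
--     return winners[0] if len(winners) == 1 else "***OPEN***"
-- ===== Notes on version B (the rewrite author's own statement) =====
-- stated objective: alternative
-- what changed: Replaces A's single fused scan with a running max and OPEN-reset sentinel by two separate passes: compute the maximum of the values, then collect the winners whose votes equal it, returning the sole winner only if the max is positive and unique.
import Mathlib
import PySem

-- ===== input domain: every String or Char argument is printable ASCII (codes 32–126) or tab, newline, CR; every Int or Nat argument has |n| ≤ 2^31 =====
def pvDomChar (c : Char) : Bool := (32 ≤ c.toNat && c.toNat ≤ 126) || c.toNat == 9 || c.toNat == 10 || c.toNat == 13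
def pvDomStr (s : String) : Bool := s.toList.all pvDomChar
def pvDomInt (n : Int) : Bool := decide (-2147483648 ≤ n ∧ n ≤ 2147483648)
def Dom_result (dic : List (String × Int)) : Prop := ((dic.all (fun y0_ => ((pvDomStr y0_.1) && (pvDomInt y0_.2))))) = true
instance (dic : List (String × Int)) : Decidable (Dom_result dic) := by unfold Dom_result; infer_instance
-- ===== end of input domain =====

-- B replaces A's single fused scan (running max + OPEN-reset sentinel) by a max pass
-- followed by a winners-filter pass; same O(n) cost, different decomposition.

-- ===== PORT A =====
-- fused scan: state = (highest_votes, person_with_highest_votes)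
def result (dic : List (String × Int)) : String :=
  (dic.foldl
    (fun (st : Int × String) pv =>
      if pv.2 > st.1 then (pv.2, pv.1)
      else if pv.2 = st.1 then (st.1, "***OPEN***")
      else st)
    (0, "***OPEN***")).2

-- ===== PORT B =====
def result_alt (dic : List (String × Int)) : String :=
  match dic with
  | [] => "***OPEN***"
  | (_, v) :: rest =>
    let m := (rest.map Prod.snd).foldl max v
    if m ≤ 0 then "***OPEN***"
    else
      let winners := (dic.filter (fun pv => pv.2 = m)).map Prod.fst
      if winners.length = 1 then winners.headD "***OPEN***" else "***OPEN***"

-- ===== PRECONDITION & SPEC =====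
def Spec_result (dic : List (String × Int)) (out : String) : Prop := out = result_alt dic
instance (dic : List (String × Int)) (out : String) : Decidable (Spec_result dic out) := by unfold Spec_result; infer_instance

-- ===== CLAIM (what is proved, stated in full; the proofs are below) =====
def Claim_equal_result : Prop := ∀ (dic : List (String × Int)), Dom_result dic → Spec_result dic (result dic)

-- ===== LEMMAS AND PROOFS =====

def pvStep : Int × String → String × Int → Int × String :=
  fun st pv =>
    if pv.2 > st.1 then (pv.2, pv.1)
    else if pv.2 = st.1 then (st.1, "***OPEN***")
    else st

theorem result_eq_foldl (dic : List (String × Int)) :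
    result dic = (dic.foldl pvStep (0, "***OPEN***")).2 := rfl

theorem foldl_max_init (l : List Int) : ∀ a b : Int,
    l.foldl max (max a b) = max a (l.foldl max b) := by
  induction l with
  | nil => intro a b; rfl
  | cons c t ih =>
    intro a b
    simp only [List.foldl_cons]
    rw [max_assoc, ih]

theorem init_le_foldl_max (l : List Int) : ∀ a : Int, a ≤ l.foldl max a := by
  induction l with
  | nil => intro a; simp
  | cons c t ih =>
    intro a
    simp only [List.foldl_cons]
    exact le_trans (le_max_left a c) (ih _)

theorem mem_le_foldl_max (l : List Int) : ∀ a b : Int, b ∈ l → b ≤ l.foldl max a := by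
  induction l with
  | nil => intro a b h; simp at h
  | cons c t ih =>
    intro a b h
    simp only [List.foldl_cons]
    rcases List.mem_cons.1 h with h | h
    · subst h; exact le_trans (le_max_right a b) (init_le_foldl_max _ _)
    · exact ih _ _ h

theorem foldl_max_mem (l : List Int) : ∀ a : Int, l.foldl max a = a ∨ l.foldl max a ∈ l := by
  induction l with
  | nil => intro a; left; rfl
  | cons c t ih =>
    intro a
    simp only [List.foldl_cons]
    rcases ih (max a c) with h | h
    · rcases max_cases a c with ⟨h2, _⟩ | ⟨h2, _⟩
      · left; rw [h, h2]
      · right; rw [h, h2]; exact List.mem_cons_self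
    · right; exact List.mem_cons_of_mem _ h

-- the true maximum of values of a nonempty (p,v)::rest
def pvMax (v : Int) (rest : List (String × Int)) : Int :=
  (rest.map Prod.snd).foldl max v

theorem result_alt_cons (p : String) (v : Int) (rest : List (String × Int)) :
    result_alt ((p, v) :: rest) =
      (if pvMax v rest ≤ 0 then "***OPEN***"
       else
         let winners := (((p, v) :: rest).filter (fun pv => pv.2 = pvMax v rest)).map Prod.fst
         if winners.length = 1 then winners.headD "***OPEN***" else "***OPEN***") := rfl

theorem pvMax_append (v : Int) (rest : List (String × Int)) (x : String × Int) :
    pvMax v (rest ++ [x]) = max (pvMax v rest) x.2 := by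
  unfold pvMax
  simp [List.foldl_append]

-- key invariant: the foldl state is (max 0 of values, result_alt)
theorem pv_invariant (l : List (String × Int)) :
    l.foldl pvStep (0, "***OPEN***") =
      ((l.map Prod.snd).foldl max 0, result_alt l) := by
  induction l using List.reverseRecOn with
  | nil => rfl
  | append_singleton l x ih =>
    obtain ⟨p, v⟩ := x
    rw [List.foldl_append, ih]
    cases l with
    | nil =>
      have h0 : result_alt [] = "***OPEN***" := rfl
      rw [h0]
      rcases lt_trichotomy v 0 with h | h | h
      · simp [pvStep, result_alt, show ¬ (0:Int) < v by omega, show v ≠ 0 by omega,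
              show max 0 v = 0 by omega]
      · subst h; simp [pvStep, result_alt]
      · simp [pvStep, result_alt, h, show ¬ v ≤ 0 by omega,
              show max 0 v = v by omega]
    | cons hd tl =>
      obtain ⟨p₀, v₀⟩ := hd
      simp only [List.cons_append]
      have hM0 : (((p₀, v₀) :: tl).map Prod.snd).foldl max 0 = max 0 (pvMax v₀ tl) := by
        unfold pvMax
        simp only [List.map_cons, List.foldl_cons]
        exact foldl_max_init _ 0 v₀
      have hM0' : (((p₀, v₀) :: (tl ++ [(p, v)])).map Prod.snd).foldl max 0
            = max 0 (pvMax v₀ (tl ++ [(p, v)])) := by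
        unfold pvMax
        simp only [List.map_cons, List.foldl_cons]
        exact foldl_max_init _ 0 v₀
      have hmapp : pvMax v₀ (tl ++ [(p, v)]) = max (pvMax v₀ tl) v := pvMax_append v₀ tl (p, v)
      set m := pvMax v₀ tl with hm
      rw [hM0, hM0', hmapp]
      unfold pvStep
      simp only [List.foldl_cons, List.foldl_nil, gt_iff_lt]
      rcases lt_trichotomy v (max 0 m) with hv | hv | hv
      · -- v < M0 : state unchanged, result_alt unchanged
        rw [if_neg (by omega), if_neg (by omega)]
        by_cases hm0 : m ≤ 0
        · -- everything OPEN
          rw [result_alt_cons, result_alt_cons, hmapp,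
              if_pos (by omega : pvMax v₀ tl ≤ 0), if_pos (by omega : max (pvMax v₀ tl) v ≤ 0)]
          simp only [Prod.mk.injEq]
          exact ⟨by omega, trivial⟩
        · -- m > 0; v < m; winners unchanged
          rw [result_alt_cons, result_alt_cons, hmapp,
              if_neg (by omega : ¬ pvMax v₀ tl ≤ 0),
              if_neg (by omega : ¬ max (pvMax v₀ tl) v ≤ 0)]
          have hfilt : (((p₀, v₀) :: (tl ++ [(p, v)])).filter
                (fun pv => pv.2 = max (pvMax v₀ tl) v))
              = (((p₀, v₀) :: tl).filter (fun pv => pv.2 = pvMax v₀ tl)) := by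
            rw [show ((p₀, v₀) :: (tl ++ [(p, v)])) = (((p₀, v₀) :: tl) ++ [(p, v)]) from rfl,
                List.filter_append]
            have h1 : max (pvMax v₀ tl) v = pvMax v₀ tl := by omega
            rw [h1]
            simp [show v ≠ pvMax v₀ tl by omega]
          rw [hfilt]
          simp only [Prod.mk.injEq]
          exact ⟨by omega, trivial⟩
      · -- v = M0 : reset to OPEN
        rw [if_neg (by omega), if_pos hv]
        by_cases hm0 : m ≤ 0
        · rw [result_alt_cons, hmapp, if_pos (by omega : max (pvMax v₀ tl) v ≤ 0)]
          simp only [Prod.mk.injEq]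
          exact ⟨by omega, trivial⟩
        · -- m > 0 and v = m : a second occurrence of the max ⇒ OPEN
          have hvm : v = m := by omega
          rw [result_alt_cons, hmapp,
              if_neg (by omega : ¬ max (pvMax v₀ tl) v ≤ 0)]
          have hmem : ∃ y ∈ ((p₀, v₀) :: tl), y.2 = pvMax v₀ tl := by
            rcases foldl_max_mem (tl.map Prod.snd) v₀ with h | h
            · exact ⟨(p₀, v₀), List.mem_cons_self, h.symm⟩
            · rcases List.mem_map.1 h with ⟨y, hy, hy2⟩
              exact ⟨y, List.mem_cons_of_mem _ hy, hy2⟩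
          have hfl : 1 ≤ (((p₀, v₀) :: tl).filter
              (fun pv => pv.2 = max (pvMax v₀ tl) v)).length := by
            rcases hmem with ⟨y, hy, hy2⟩
            have : y ∈ ((p₀, v₀) :: tl).filter (fun pv => pv.2 = max (pvMax v₀ tl) v) := by
              rw [List.mem_filter]
              refine ⟨hy, ?_⟩
              simp only [decide_eq_true_eq]
              omega
            exact List.length_pos_of_mem this
          have hfilt : (((p₀, v₀) :: (tl ++ [(p, v)])).filter
                (fun pv => pv.2 = max (pvMax v₀ tl) v))
              = (((p₀, v₀) :: tl).filter (fun pv => pv.2 = max (pvMax v₀ tl) v)) ++ [(p, v)] := by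
            rw [show ((p₀, v₀) :: (tl ++ [(p, v)])) = (((p₀, v₀) :: tl) ++ [(p, v)]) from rfl,
                List.filter_append]
            have h1 : (List.filter (fun pv => pv.2 = max (pvMax v₀ tl) v) [(p, v)]) = [(p, v)] := by
              simp only [List.filter_cons, List.filter_nil, decide_eq_true_eq]
              rw [if_pos (by omega)]
            rw [h1]
          rw [hfilt]
          rw [if_neg (by
            simp only [List.map_append, List.length_append, List.length_map,
              List.map_cons, List.map_nil, List.length_cons, List.length_nil]
            omega)]
          simp only [Prod.mk.injEq]
          exact ⟨by omega, trivial⟩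
      · -- v > M0 : (p, v) is the new unique winner
        rw [if_pos hv]
        rw [result_alt_cons, hmapp,
            if_neg (by omega : ¬ max (pvMax v₀ tl) v ≤ 0)]
        have hfilt : (((p₀, v₀) :: (tl ++ [(p, v)])).filter
              (fun pv => pv.2 = max (pvMax v₀ tl) v)) = [(p, v)] := by
          rw [show ((p₀, v₀) :: (tl ++ [(p, v)])) = (((p₀, v₀) :: tl) ++ [(p, v)]) from rfl,
              List.filter_append]
          have hnil : (((p₀, v₀) :: tl).filter (fun pv => pv.2 = max (pvMax v₀ tl) v)) = [] := by
            rw [List.filter_eq_nil_iff]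
            intro y hy
            have hle : y.2 ≤ pvMax v₀ tl := by
              rcases List.mem_cons.1 hy with h | h
              · rw [h]; exact init_le_foldl_max _ _
              · exact mem_le_foldl_max _ _ _ (List.mem_map_of_mem h)
            simp only [decide_eq_true_eq]
            omega
          rw [hnil, List.nil_append]
          have h1 : (List.filter (fun pv => pv.2 = max (pvMax v₀ tl) v) [(p, v)]) = [(p, v)] := by
            simp only [List.filter_cons, List.filter_nil, decide_eq_true_eq]
            rw [if_pos (by omega)]
          rw [h1]
        rw [hfilt]
        simp only [List.map_cons, List.map_nil, List.length_cons, List.length_nil,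
          List.headD_cons]
        rw [if_pos trivial]
        simp only [Prod.mk.injEq]
        exact ⟨by omega, trivial⟩

-- ===== VERDICT (by name: the statement is the Claim_ definition above) =====
theorem result_spec : Claim_equal_result := by
  intro dic _
  unfold Spec_result
  rw [result_eq_foldl, pv_invariant]
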